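-- pv_equiv track=rewrite | github.com/uniqueumesh/AI-Backlinker | ai_backlinking.py | _classify_support_links
-- ===== SOURCE A (Python) =====
-- def _classify_support_links(links: list[str]) -> tuple[str, str]:
--     """Return (guidelines_url, contact_form_url) from list of links."""
--     guidelines_kw = ("write-for-us", "write for us", "guest", "contribute", "submission", "submit", "guidelines", "editorial")
--     contact_kw = ("contact", "contact-us", "contactus", "contact_us", "form")
--     g_url = ""
--     c_url = ""
--     for u in links:
--         low = u.lower()
--         if not g_url and any(k in low for k in guidelines_kw):
--             g_url = u
--         if not c_url and any(k in low for k in contact_kw):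
--             c_url = u
--         if g_url and c_url:
--             break
--     return g_url, c_url
-- ===== SOURCE B (Python) =====
-- def _classify_support_links(links: list[str]) -> tuple[str, str]:
--     """Return (guidelines_url, contact_form_url) from list of links."""
--     guidelines_kw = ("write-for-us", "write for us", "guest", "contribute", "submission", "submit", "guidelines", "editorial")
--     contact_kw = ("contact", "contact-us", "contactus", "contact_us", "form")
--
--     def first(kws):
--         return next((u for u in links if any(k in u.lower() for k in kws)), "")
--
--     return first(guidelines_kw), first(contact_kw)
-- ===== Notes on version B (the rewrite author's own statement) =====
-- stated objective: simpler
-- what changed: Replaces the single interleaved loop with shared state and an early-exit break by two independent first-match searches (next over a generator), one per keyword family.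
import Mathlib
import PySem

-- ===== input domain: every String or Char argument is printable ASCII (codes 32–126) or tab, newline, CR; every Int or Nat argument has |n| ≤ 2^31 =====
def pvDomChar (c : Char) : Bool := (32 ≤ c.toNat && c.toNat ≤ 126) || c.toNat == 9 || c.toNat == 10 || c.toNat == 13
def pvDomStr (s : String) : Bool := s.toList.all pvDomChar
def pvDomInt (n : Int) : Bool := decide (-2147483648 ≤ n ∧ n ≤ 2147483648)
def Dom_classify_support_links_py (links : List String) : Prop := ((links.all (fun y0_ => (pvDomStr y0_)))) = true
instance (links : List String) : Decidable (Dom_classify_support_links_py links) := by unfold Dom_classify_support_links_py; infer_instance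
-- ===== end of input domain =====

-- B replaces A's single interleaved loop (shared g/c state + early break) by two
-- independent first-match searches, one per keyword family; objective: simpler.


-- shared keyword constants (the same literal tuples in both Pythons)
def pvGuidelinesKw : List String := ["write-for-us", "write for us", "guest", "contribute", "submission", "submit", "guidelines", "editorial"]
def pvContactKw : List String := ["contact", "contact-us", "contactus", "contact_us", "form"]

-- "any(k in u.lower() for k in kws)"
def pvMatches (kws : List String) (u : String) : Bool :=
  kws.any (fun k => PySem.Str.isIn k (PySem.Str.lower u))

-- ===== PORT A =====
-- the for-loop of A: state (g_url, c_url), break when both set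
def classifyLoopA : List String → String → String → String × String
  | [], g, c => (g, c)
  | u :: rest, g, c =>
    let g' := if g = "" ∧ pvMatches pvGuidelinesKw u = true then u else g
    let c' := if c = "" ∧ pvMatches pvContactKw u = true then u else c
    if g' ≠ "" ∧ c' ≠ "" then (g', c') else classifyLoopA rest g' c'

def classify_support_links_py (links : List String) : String × String :=
  classifyLoopA links "" ""

-- ===== PORT B =====
-- next((u for u in links if any(k in u.lower() for k in kws)), "")
def pvFirstMatch (kws : List String) (links : List String) : String :=
  (links.find? (fun u => pvMatches kws u)).getD ""

def classify_support_links_py_alt (links : List String) : String × String :=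
  (pvFirstMatch pvGuidelinesKw links, pvFirstMatch pvContactKw links)

-- ===== PRECONDITION & SPEC =====
def Spec_classify_support_links_py (links : List String) (out : String × String) : Prop := out = classify_support_links_py_alt links
instance (links : List String) (out : String × String) : Decidable (Spec_classify_support_links_py links out) := by unfold Spec_classify_support_links_py; infer_instance

-- ===== CLAIM =====
def Claim_equal_classify_support_links_py : Prop := ∀ (links : List String), Dom_classify_support_links_py links → Spec_classify_support_links_py links (classify_support_links_py links)

-- ===== LEMMAS AND PROOFS =====

-- a url matched by a keyword family is never the empty string (keywords are nonempty)
lemma pvMatches_G_empty : pvMatches pvGuidelinesKw "" = false := by decide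

lemma pvMatches_C_empty : pvMatches pvContactKw "" = false := by decide

lemma matches_ne_empty {kws : List String} {u : String}
    (he : pvMatches kws "" = false) (h : pvMatches kws u = true) : u ≠ "" := by
  intro hu; rw [hu] at h; simp [he] at h

lemma pvFirstMatch_cons (kws : List String) (u : String) (rest : List String) :
    pvFirstMatch kws (u :: rest) =
      if pvMatches kws u = true then u else pvFirstMatch kws rest := by
  unfold pvFirstMatch
  rcases h : pvMatches kws u <;> simp [h]

lemma classifyLoopA_eq (links : List String) : ∀ g c : String, (g = "" ∨ c = "") →
    classifyLoopA links g c =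
      ((if g = "" then pvFirstMatch pvGuidelinesKw links else g),
       (if c = "" then pvFirstMatch pvContactKw links else c)) := by
  induction links with
  | nil =>
    intro g c _
    simp only [classifyLoopA, pvFirstMatch, List.find?_nil, Option.getD_none, Prod.mk.injEq]
    constructor <;> (split <;> simp_all)
  | cons u rest ih =>
    intro g c hgc
    by_cases hP : pvMatches pvGuidelinesKw u = true <;>
      by_cases hQ : pvMatches pvContactKw u = true
    · have hu : u ≠ "" := matches_ne_empty pvMatches_G_empty hP
      by_cases hg : g = "" <;> by_cases hc : c = "" <;>
        simp_all [classifyLoopA, pvFirstMatch_cons]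
    · have hu : u ≠ "" := matches_ne_empty pvMatches_G_empty hP
      by_cases hg : g = "" <;> by_cases hc : c = "" <;>
        simp_all [classifyLoopA, pvFirstMatch_cons]
    · have hu : u ≠ "" := matches_ne_empty pvMatches_C_empty hQ
      by_cases hg : g = "" <;> by_cases hc : c = "" <;>
        simp_all [classifyLoopA, pvFirstMatch_cons]
    · by_cases hg : g = "" <;> by_cases hc : c = "" <;>
        simp_all [classifyLoopA, pvFirstMatch_cons]

-- ===== VERDICT =====
theorem classify_support_links_py_spec : Claim_equal_classify_support_links_py := by
  intro links _
  unfold Spec_classify_support_links_py classify_support_links_py classify_support_links_py_alt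
  simpa using classifyLoopA_eq links "" "" (Or.inl rfl)
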